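-- pv_equiv track=rewrite | github.com/spaydar/leetcode | python/p0178_graph_valid_tree.py | is_valid_tree
-- ===== SOURCE A (Python) =====
-- from typing import List
--
-- def is_valid_tree(n: int, edges: List[List[int]]) -> bool:
--     if len(edges) != n - 1:
--         return False
--     parent = [i for i in range(n)]
--     size = [1 for _ in range(n)]
--     def find_parent(node: int) -> int:
--         while node != parent[node]:
--             parent[node] = parent[parent[node]]
--             node = parent[node]
--         return node
--     def union(x: int, y: int) -> bool:
--         x_par, y_par = find_parent(x), find_parent(y)
--         if x_par == y_par:
--             return False
--         if size[x_par] > size[y_par]: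
--             parent[y_par] = x_par
--             size[x_par] += 1
--         else:
--             parent[x_par] = y_par
--             size[y_par] += 1
--         return True
--     for x, y in edges:
--         if not union(x, y):
--             return False
--     return True
-- ===== SOURCE B (Python) =====
-- def is_valid_tree(n, edges):
--     # Component-relabelling instead of a disjoint-set forest: keep a flat label
--     # array and, for each edge, merge the two labels by rewriting one over the
--     # other; same result, no parent pointers, no find loops.
--     if len(edges) != n - 1:
--         return False
--     comp = list(range(n))
--     for x, y in edges:
--         cx, cy = comp[x], comp[y]
--         if cx == cy:
--             return False
--         comp = [cy if c == cx else c for c in comp]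
--     return True
-- ===== Notes on version B (the rewrite author's own statement) =====
-- stated objective: simpler
-- what changed: Replaced the disjoint-set forest (parent/size arrays, while-loop find with path halving, union by size) by a single flat component-label array that is merged by relabelling one label over the other for each edge.
-- outside the precondition, e.g. on is_valid_tree(4, [[0, 1], [0, 1], [5, 9]]): A returns False, B returns False
import Mathlib
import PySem

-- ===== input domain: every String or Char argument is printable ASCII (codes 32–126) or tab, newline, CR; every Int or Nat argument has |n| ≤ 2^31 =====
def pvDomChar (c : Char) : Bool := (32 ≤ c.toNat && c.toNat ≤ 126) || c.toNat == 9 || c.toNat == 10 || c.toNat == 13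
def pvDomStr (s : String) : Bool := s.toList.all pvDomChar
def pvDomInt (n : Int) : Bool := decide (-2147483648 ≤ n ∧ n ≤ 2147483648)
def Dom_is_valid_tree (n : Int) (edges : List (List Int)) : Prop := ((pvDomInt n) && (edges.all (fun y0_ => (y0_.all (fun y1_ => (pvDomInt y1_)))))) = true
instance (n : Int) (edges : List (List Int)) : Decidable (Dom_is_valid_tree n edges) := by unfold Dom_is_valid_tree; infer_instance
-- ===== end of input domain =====

-- B replaces A's union-find (parent/size arrays, path-halving find, union by size) with a flat
-- component-label array merged by relabelling per edge: structurally simpler, same return value.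


-- ===== PORT A =====
-- find_parent's while loop with path halving; the fuel argument is only a termination guard
-- (proved sufficient on Pre_), every step is the Python statement it mirrors.
def pvFindLoop : Nat → List Int → Int → Option (List Int × Int)
  | 0, _, _ => none
  | fuel + 1, parent, node =>
    match PySem.List.pyGet? parent node with       -- parent[node]
    | none => none
    | some p =>
      if node = p then some (parent, node)          -- while node != parent[node]
      else
        match PySem.List.pyGet? parent p with       -- parent[parent[node]]
        | none => none
        | some pp =>
          -- parent[node] = parent[parent[node]]; node = parent[node]
          pvFindLoop fuel (PySem.List.pySetD parent node pp) pp

-- union(x, y): the two finds (threading the mutated parent array), then union by size.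
def pvUnion (fuel : Nat) (parent size : List Int) (x y : Int) :
    Option (List Int × List Int × Bool) :=
  match pvFindLoop fuel parent x with
  | none => none
  | some (p1, xr) =>
    match pvFindLoop fuel p1 y with
    | none => none
    | some (p2, yr) =>
      if xr = yr then some (p2, size, false)
      else
        match PySem.List.pyGet? size xr, PySem.List.pyGet? size yr with
        | some sx, some sy =>
          if sx > sy then
            some (PySem.List.pySetD p2 yr xr, PySem.List.pySetD size xr (sx + 1), true)
          else
            some (PySem.List.pySetD p2 xr yr, PySem.List.pySetD size yr (sy + 1), true)
        | _, _ => none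

-- for x, y in edges: if not union(x, y): return False
def pvRunA (fuel : Nat) : List Int → List Int → List (List Int) → Bool
  | _, _, [] => true
  | parent, size, e :: rest =>
    match e with
    | [x, y] =>
      match pvUnion fuel parent size x y with
      | none => false                               -- Python raises here (outside Pre_)
      | some (p', s', ok) => if ok then pvRunA fuel p' s' rest else false
    | _ => false                                    -- unpacking raises here (outside Pre_)

def is_valid_tree (n : Int) (edges : List (List Int)) : Bool :=
  if (edges.length : Int) ≠ n - 1 then false
  else
    let parent := PySem.List.pyRange 0 n 1                        -- [i for i in range(n)]
    let size := (PySem.List.pyRange 0 n 1).map (fun _ => (1 : Int))  -- [1 for _ in range(n)]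
    pvRunA (parent.length + edges.length + 1) parent size edges

-- ===== PORT B =====
-- for x, y in edges: merge label comp[x] into comp[y] by rewriting the whole label array.
def pvRunB : List Int → List (List Int) → Bool
  | _, [] => true
  | comp, e :: rest =>
    match e with
    | [x, y] =>
      match PySem.List.pyGet? comp x, PySem.List.pyGet? comp y with
      | some cx, some cy =>
        if cx = cy then false
        else pvRunB (comp.map (fun c => if c = cx then cy else c)) rest
      | _, _ => false                               -- Python raises here (outside Pre_)
    | _ => false                                    -- unpacking raises here (outside Pre_)

def is_valid_tree_alt (n : Int) (edges : List (List Int)) : Bool :=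
  if (edges.length : Int) ≠ n - 1 then false
  else pvRunB (PySem.List.pyRange 0 n 1) edges

-- ===== PRECONDITION & SPEC =====
-- Pre_ excludes inputs whose edge list (when it passes the length guard) contains a non-pair or an
-- endpoint outside [-n, n): there Python A raises ValueError/IndexError — except on a few where an
-- earlier repeated/cyclic edge makes A (and B alike) return False before reaching the bad edge.
def Pre_is_valid_tree (n : Int) (edges : List (List Int)) : Prop :=
  (edges.length : Int) = n - 1 →
    ∀ e ∈ edges, e.length = 2 ∧ ∀ v ∈ e, -n ≤ v ∧ v < n
instance (n : Int) (edges : List (List Int)) : Decidable (Pre_is_valid_tree n edges) := by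
  unfold Pre_is_valid_tree; infer_instance

def pvWitness_is_valid_tree : Int × List (List Int) := (3, [[0, 1], [1, 2]])

def Spec_is_valid_tree (n : Int) (edges : List (List Int)) (out : Bool) : Prop := out = is_valid_tree_alt n edges
instance (n : Int) (edges : List (List Int)) (out : Bool) : Decidable (Spec_is_valid_tree n edges out) := by unfold Spec_is_valid_tree; infer_instance

-- ===== CLAIM (what is proved, stated in full; the proofs are below) =====
def Claim_equal_is_valid_tree : Prop := ∀ (n : Int) (edges : List (List Int)), Dom_is_valid_tree n edges → Pre_is_valid_tree n edges → Spec_is_valid_tree n edges (is_valid_tree n edges)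

-- ===== LEMMAS AND PROOFS =====

-- Normalised cell of a Python index (matches PySem.List.pyIdx? on in-range indices).
def pvCell (len : Nat) (x : Int) : Nat := if 0 ≤ x then x.toNat else len - (-x).toNat

theorem pvCell_lt {len : Nat} {x : Int} (h1 : -(len : Int) ≤ x) (h2 : x < len) :
    pvCell len x < len := by
  unfold pvCell; split_ifs with h <;> omega

theorem pvGet_cell {α : Type} (P : List α) (x : Int)
    (h1 : -(P.length : Int) ≤ x) (h2 : x < P.length) :
    PySem.List.pyGet? P x = P[pvCell P.length x]? := by
  simp [PySem.List.pyGet?, PySem.List.pyIdx?, pvCell]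
  split_ifs with h <;> simp_all

theorem pvSet_cell {α : Type} (P : List α) (x : Int) (v : α)
    (h1 : -(P.length : Int) ≤ x) (h2 : x < P.length) :
    PySem.List.pySetD P x v = P.set (pvCell P.length x) v := by
  simp [PySem.List.pySetD, PySem.List.pySet?, PySem.List.pyIdx?, pvCell]
  split_ifs with h <;> simp_all

-- The abstract chase of parent pointers (the value find_parent computes, fuel-indexed).
def pvRootAux : Nat → List Int → Nat → Option Nat
  | 0, _, _ => none
  | k + 1, P, c =>
    match P[c]? with
    | none => none
    | some p => if (c : Int) = p then some c else pvRootAux k P p.toNat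

theorem pvRootAux_mono {P : List Int} {k : Nat} {c r : Nat}
    (h : pvRootAux k P c = some r) : pvRootAux (k + 1) P c = some r := by
  induction k generalizing c with
  | zero => simp [pvRootAux] at h
  | succ k ih =>
    rw [pvRootAux] at h ⊢
    cases hp : P[c]? with
    | none => simp [hp] at h
    | some p =>
      simp only [hp] at h ⊢
      split at h
      · split <;> simp_all
      · split
        · simp_all
        · exact ih h

theorem pvRootAux_le {P : List Int} {k k' : Nat} {c r : Nat} (hk : k ≤ k')
    (h : pvRootAux k P c = some r) : pvRootAux k' P c = some r := by
  obtain ⟨d, rfl⟩ := Nat.exists_eq_add_of_le hk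
  clear hk
  induction d with
  | zero => simpa using h
  | succ d ih => rw [Nat.add_succ]; exact pvRootAux_mono ih

theorem pvRootAux_unique {P : List Int} {k k' : Nat} {c r r' : Nat}
    (h : pvRootAux k P c = some r) (h' : pvRootAux k' P c = some r') : r = r' := by
  have h1 := pvRootAux_le (Nat.le_max_left k k') h
  have h2 := pvRootAux_le (Nat.le_max_right k k') h'
  rw [h1] at h2; exact (Option.some_injective _ h2)

theorem pvRootAux_one {P : List Int} {c : Nat} (h : P[c]? = some (c : Int)) :
    pvRootAux 1 P c = some c := by
  rw [pvRootAux]; simp [h]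

theorem pvRootAux_root {P : List Int} {k c r : Nat}
    (h : pvRootAux k P c = some r) : r < P.length ∧ P[r]? = some (r : Int) := by
  induction k generalizing c with
  | zero => simp [pvRootAux] at h
  | succ k ih =>
    rw [pvRootAux] at h
    cases hp : P[c]? with
    | none => simp [hp] at h
    | some p =>
      simp only [hp] at h
      split at h
      · cases h
        exact ⟨(List.getElem?_eq_some_iff.mp hp).1, by simp_all⟩
      · exact ih h

def pvRange (P : List Int) : Prop := ∀ v ∈ P, 0 ≤ v ∧ v < (P.length : Int)

theorem pvRange_set {P : List Int} {c : Nat} {v : Int} (hR : pvRange P)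
    (h0 : 0 ≤ v) (h1 : v < (P.length : Int)) : pvRange (P.set c v) := by
  intro w hw
  rw [List.length_set]
  rcases List.mem_or_eq_of_mem_set hw with h | h
  · exact hR w h
  · subst h; exact ⟨h0, h1⟩

-- Shortcut: a path-halving write never changes (and never lengthens) any pointer chase.
theorem pvShort {P : List Int} {c : Nat} {p v : Int}
    (hp : P[c]? = some p) (hp0 : 0 ≤ p) (hv : P[p.toNat]? = some v) :
    ∀ k i r, pvRootAux k P i = some r → ∃ k' ≤ k, pvRootAux k' (P.set c v) i = some r := by
  intro k
  induction k using Nat.strong_induction_on with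
  | _ k IH =>
  intro i r h
  match k, h with
  | k₀ + 1, h =>
  have hc : c < P.length := (List.getElem?_eq_some_iff.mp hp).1
  rw [pvRootAux] at h
  cases hq : P[i]? with
  | none => simp [hq] at h
  | some q =>
  simp only [hq] at h
  by_cases hic : i = c
  · subst hic
    have hqp : q = p := by rw [hq] at hp; exact Option.some_injective _ hp
    subst hqp
    by_cases hcp : (i : Int) = q
    · simp only [if_pos hcp] at h
      obtain rfl : i = r := Option.some_injective _ h
      have hvq : v = q := by
        have : q.toNat = i := by omega
        rw [this, hq] at hv; exact (Option.some_injective _ hv).symm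
      refine ⟨1, by omega, ?_⟩
      rw [pvRootAux]
      simp [List.getElem?_set_self hc, hvq, hcp]
    · simp only [if_neg hcp] at h
      match k₀, h with
      | k₁ + 1, h =>
      rw [pvRootAux] at h
      simp only [hv] at h
      by_cases hpv : (q.toNat : Int) = v
      · simp only [if_pos hpv] at h
        obtain rfl : q.toNat = r := Option.some_injective _ h
        refine ⟨2, by omega, ?_⟩
        rw [pvRootAux]
        have h1 : (P.set i v)[i]? = some v := List.getElem?_set_self hc
        have hciv : (i : Int) ≠ v := by omega
        simp only [h1, if_neg hciv]
        rw [pvRootAux]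
        have hvq : v.toNat = q.toNat := by omega
        have hne2 : i ≠ q.toNat := by omega
        rw [hvq, List.getElem?_set_ne hne2, hv]
        simp [hpv]
      · simp only [if_neg hpv] at h
        obtain ⟨k₂, hk₂, h₂⟩ := IH k₁ (by omega) v.toNat r h
        by_cases hcv : (i : Int) = v
        · have : v.toNat = i := by omega
          rw [this] at h₂
          exact ⟨k₂, by omega, h₂⟩
        · refine ⟨k₂ + 1, by omega, ?_⟩
          rw [pvRootAux]
          simp only [List.getElem?_set_self hc, if_neg hcv]
          exact h₂
  · have hq' : (P.set c v)[i]? = some q := by rw [List.getElem?_set_ne (fun e => hic e.symm), hq]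
    by_cases hiq : (i : Int) = q
    · simp only [if_pos hiq] at h
      refine ⟨1, by omega, ?_⟩
      rw [pvRootAux]; simp [hq', hiq, h]
    · simp only [if_neg hiq] at h
      obtain ⟨k₂, hk₂, h₂⟩ := IH k₀ (by omega) q.toNat r h
      refine ⟨k₂ + 1, by omega, ?_⟩
      rw [pvRootAux]
      simp only [hq', if_neg hiq]
      exact h₂

-- A write at a root cell: chases that ended elsewhere are unchanged...
theorem pvSetRoot_ne {P : List Int} {a : Nat} (hroot : P[a]? = some (a : Int)) (b : Int) :
    ∀ k i r, pvRootAux k P i = some r → r ≠ a → pvRootAux k (P.set a b) i = some r := by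
  intro k
  induction k with
  | zero => intro i r h; simp [pvRootAux] at h
  | succ k ih =>
    intro i r h hra
    rw [pvRootAux] at h ⊢
    cases hq : P[i]? with
    | none => simp [hq] at h
    | some q =>
    simp only [hq] at h
    by_cases hia : i = a
    · subst hia
      have : q = (i : Int) := by rw [hq] at hroot; exact Option.some_injective _ hroot
      subst this
      rw [if_pos rfl] at h
      exact absurd (Option.some_injective _ h).symm hra
    · rw [List.getElem?_set_ne (fun e => hia e.symm)]
      simp only [hq]
      by_cases hiq : (i : Int) = q
      · rw [if_pos hiq] at h ⊢; exact h
      · rw [if_neg hiq] at h ⊢; exact ih _ _ h hra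

-- ... and chases that ended at the overwritten root now end at the new root.
theorem pvSetRoot_to {P : List Int} {a b : Nat}
    (hroota : P[a]? = some (a : Int)) (hrootb : P[b]? = some (b : Int)) (hab : a ≠ b) :
    ∀ k i, pvRootAux k P i = some a → pvRootAux (k + 1) (P.set a (b : Int)) i = some b := by
  intro k
  induction k with
  | zero => intro i h; simp [pvRootAux] at h
  | succ k ih =>
    intro i h
    have ha : a < P.length := (List.getElem?_eq_some_iff.mp hroota).1
    rw [pvRootAux] at h
    cases hq : P[i]? with
    | none => simp [hq] at h
    | some q =>
    simp only [hq] at h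
    by_cases hia : i = a
    · subst hia
      rw [pvRootAux]
      have hsa : (P.set i (b : Int))[i]? = some (b : Int) := List.getElem?_set_self ha
      have hib : (i : Int) ≠ (b : Int) := by
        intro e; exact hab (by exact_mod_cast e)
      simp only [hsa, if_neg hib]
      -- chase from b in the set array: b is still a root
      have hbne : i ≠ b := hab
      have hsb : (P.set i (b : Int))[b]? = some (b : Int) := by
        rw [List.getElem?_set_ne hbne, hrootb]
      rw [pvRootAux]
      simp [hsb]
    · rw [pvRootAux]
      rw [List.getElem?_set_ne (fun e => hia e.symm)]
      simp only [hq]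
      by_cases hiq : (i : Int) = q
      · rw [if_pos hiq] at h
        exact absurd (Option.some_injective _ h) hia
      · rw [if_neg hiq] at h ⊢
        exact ih _ h

-- One body iteration of find_parent, measured on the abstract chase.
theorem pvStep {P : List Int} {c : Nat} {p pp : Int}
    (hp : P[c]? = some p) (hp0 : 0 ≤ p) (hpp : P[p.toNat]? = some pp)
    {k r : Nat} (hr : pvRootAux k P c = some r) :
    ∃ k₂, k₂ ≤ k ∧ ((c : Int) ≠ p → k₂ < k) ∧
      pvRootAux k₂ (P.set c pp) pp.toNat = some r := by
  have hc : c < P.length := (List.getElem?_eq_some_iff.mp hp).1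
  match k, hr with
  | k₀ + 1, hr =>
  rw [pvRootAux] at hr
  simp only [hp] at hr
  by_cases hcp : (c : Int) = p
  · rw [if_pos hcp] at hr
    obtain rfl : c = r := Option.some_injective _ hr
    have hptc : p.toNat = c := by omega
    have hppp : pp = p := by rw [hptc, hp] at hpp; exact (Option.some_injective _ hpp).symm
    refine ⟨1, by omega, fun hne => absurd hcp hne, ?_⟩
    rw [pvRootAux]
    have hppc : pp.toNat = c := by omega
    rw [hppc]
    simp [List.getElem?_set_self hc, hppp, hcp]
  · rw [if_neg hcp] at hr
    match k₀, hr with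
    | k₁ + 1, hr =>
    rw [pvRootAux] at hr
    simp only [hpp] at hr
    by_cases hpv : (p.toNat : Int) = pp
    · rw [if_pos hpv] at hr
      obtain rfl : p.toNat = r := Option.some_injective _ hr
      refine ⟨1, by omega, by omega, ?_⟩
      rw [pvRootAux]
      have h1 : pp.toNat = p.toNat := by omega
      have h2 : c ≠ p.toNat := by omega
      rw [h1, List.getElem?_set_ne h2]
      simp only [hpp]
      rw [if_pos hpv]
    · rw [if_neg hpv] at hr
      obtain ⟨k₂, hk₂, h₂⟩ := pvShort hp hp0 hpp k₁ pp.toNat r hr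
      exact ⟨k₂, by omega, by omega, h₂⟩

-- find_parent: returns the root of the start cell, keeps length/range, and only shortens chases.
theorem pvFind_spec :
    ∀ k fuel (P : List Int) (c : Nat) {r : Nat}, pvRange P →
      pvRootAux k P c = some r → k ≤ fuel →
      ∃ P', pvFindLoop fuel P (c : Int) = some (P', (r : Int)) ∧
        P'.length = P.length ∧ pvRange P' ∧
        ∀ i r' k₁, pvRootAux k₁ P i = some r' → ∃ k₂ ≤ k₁, pvRootAux k₂ P' i = some r' := by
  intro k
  induction k using Nat.strong_induction_on with
  | _ k IH =>
  intro fuel P c r hR hr hk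
  have hr0 := hr
  match k, hr, hk with
  | k₀ + 1, hr, hk =>
  match fuel, hk with
  | f + 1, _ =>
  rw [pvFindLoop]
  rw [pvRootAux] at hr
  cases hq : P[c]? with
  | none => rw [hq] at hr; simp at hr
  | some p =>
  have hc : c < P.length := (List.getElem?_eq_some_iff.mp hq).1
  simp only [hq] at hr
  have hget : PySem.List.pyGet? P (c : Int) = some p := by
    rw [PySem.List.pyGet?_natCast P c, hq]
  simp only [hget]
  by_cases hcp : (c : Int) = p
  · rw [if_pos hcp] at hr ⊢
    obtain rfl : c = r := Option.some_injective _ hr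
    exact ⟨P, rfl, rfl, hR, fun i r' k₁ h => ⟨k₁, le_refl _, h⟩⟩
  · rw [if_neg hcp] at hr ⊢
    obtain ⟨hp0, hpl⟩ := hR p (List.mem_of_getElem? hq)
    cases hpp : P[p.toNat]? with
    | none =>
      exfalso
      have := List.getElem?_eq_none_iff.mp hpp
      omega
    | some pp =>
    have hget2 : PySem.List.pyGet? P p = some pp := by
      rw [PySem.List.pyGet?_of_nonneg P hp0, hpp]
    simp only [hget2]
    have hsets : PySem.List.pySetD P (c : Int) pp = P.set c pp := by
      simp
    rw [hsets]
    obtain ⟨hpp0, hppl⟩ := hR pp (List.mem_of_getElem? hpp)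
    obtain ⟨k₂, hk₂le, hk₂lt, h₂⟩ := pvStep hq hp0 hpp hr0
    have hk₂ : k₂ < k₀ + 1 := hk₂lt hcp
    have hR1 : pvRange (P.set c pp) := pvRange_set hR hpp0 hppl
    obtain ⟨P', hP', hlen, hR', htrans⟩ :=
      IH k₂ hk₂ f (P.set c pp) pp.toNat hR1 h₂ (by omega)
    have hcast : ((pp.toNat : Nat) : Int) = pp := by omega
    rw [hcast] at hP'
    refine ⟨P', hP', by rw [hlen, List.length_set], hR', ?_⟩
    intro i r' k₁ h
    obtain ⟨ka, hka, ha⟩ := pvShort hq hp0 hpp k₁ i r' h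
    obtain ⟨kb, hkb, hb⟩ := htrans i r' ka ha
    exact ⟨kb, by omega, hb⟩

-- find_parent on an arbitrary in-range (possibly negative) Python index.
theorem pvFind_specI {P : List Int} {k r : Nat} (x : Int) (hR : pvRange P)
    (hx1 : -(P.length : Int) ≤ x) (hx2 : x < P.length)
    (hr : pvRootAux k P (pvCell P.length x) = some r) {fuel : Nat} (hfuel : k + 1 ≤ fuel) :
    ∃ P', pvFindLoop fuel P x = some (P', (r : Int)) ∧
      P'.length = P.length ∧ pvRange P' ∧
      ∀ i r' k₁, pvRootAux k₁ P i = some r' → ∃ k₂ ≤ k₁, pvRootAux k₂ P' i = some r' := by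
  by_cases hx0 : 0 ≤ x
  · have hcell : pvCell P.length x = x.toNat := by simp [pvCell, hx0]
    rw [hcell] at hr
    have hxc : ((x.toNat : Nat) : Int) = x := by omega
    obtain ⟨P', h1, h2, h3, h4⟩ := pvFind_spec k fuel P x.toNat hR hr (by omega)
    rw [hxc] at h1
    exact ⟨P', h1, h2, h3, h4⟩
  · have hc : pvCell P.length x < P.length := pvCell_lt hx1 hx2
    match fuel, hfuel with
    | f + 1, _ =>
    rw [pvFindLoop]
    have hgx : PySem.List.pyGet? P x = P[pvCell P.length x]? := pvGet_cell P x hx1 hx2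
    cases hq : P[pvCell P.length x]? with
    | none => exfalso; have := List.getElem?_eq_none_iff.mp hq; omega
    | some p =>
    simp only [hgx, hq]
    obtain ⟨hp0, hpl⟩ := hR p (List.mem_of_getElem? hq)
    have hxp : x ≠ p := by omega
    rw [if_neg hxp]
    cases hpp : P[p.toNat]? with
    | none =>
      exfalso
      have := List.getElem?_eq_none_iff.mp hpp
      omega
    | some pp =>
    have hg2 : PySem.List.pyGet? P p = some pp := by
      rw [PySem.List.pyGet?_of_nonneg P hp0, hpp]
    simp only [hg2]
    have hset : PySem.List.pySetD P x pp = P.set (pvCell P.length x) pp :=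
      pvSet_cell P x pp hx1 hx2
    rw [hset]
    obtain ⟨hpp0, hppl⟩ := hR pp (List.mem_of_getElem? hpp)
    obtain ⟨k₂, hk₂le, _, h₂⟩ := pvStep hq hp0 hpp hr
    have hR1 := pvRange_set (c := pvCell P.length x) hR hpp0 hppl
    obtain ⟨P', h1, h2, h3, h4⟩ := pvFind_spec k₂ f (P.set (pvCell P.length x) pp) pp.toNat hR1 h₂ (by omega)
    have hcast : ((pp.toNat : Nat) : Int) = pp := by omega
    rw [hcast] at h1
    refine ⟨P', h1, by rw [h2, List.length_set], h3, ?_⟩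
    intro i r' k₁ h
    obtain ⟨ka, hka, ha⟩ := pvShort hq hp0 hpp k₁ i r' h
    obtain ⟨kb, hkb, hb⟩ := h4 i r' ka ha
    exact ⟨kb, by omega, hb⟩

def pvTerm (P : List Int) (B : Nat) : Prop :=
  ∀ c, c < P.length → ∃ r, ∃ k ≤ B, pvRootAux k P c = some r

def pvRel (P comp : List Int) : Prop :=
  ∀ i j ri rj ki kj, i < comp.length → j < comp.length →
    pvRootAux ki P i = some ri → pvRootAux kj P j = some rj →
    (ri = rj ↔ comp[i]? = comp[j]?)

theorem pvMerge_eq_iff {α : Type} [DecidableEq α] (u v a b : α) (hab : a ≠ b) :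
    ((if u = a then b else u) = (if v = a then b else v)) ↔
      (u = v ∨ ((u = a ∨ u = b) ∧ (v = a ∨ v = b))) := by
  split_ifs <;> aesop

-- Re-pointing root a to root b merges the two classes; the label array merges the matching labels.
theorem pvSetRootPack {P₂ comp : List Int} {B : Nat} {a b ia ib : Nat} {ca cb cu cv : Int}
    (hT2 : pvTerm P₂ B) (hRel2 : pvRel P₂ comp)
    (hclen : comp.length = P₂.length)
    (hia : ia < comp.length) (hib : ib < comp.length)
    {ka kb : Nat} (hca : comp[ia]? = some ca) (hcb : comp[ib]? = some cb)
    (hra : pvRootAux ka P₂ ia = some a) (hrb : pvRootAux kb P₂ ib = some b)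
    (hab : a ≠ b)
    (huv : (cu = ca ∧ cv = cb) ∨ (cu = cb ∧ cv = ca)) :
    pvTerm (P₂.set a (b : Int)) (B + 1) ∧
      pvRel (P₂.set a (b : Int)) (comp.map (fun c => if c = cu then cv else c)) := by
  have hroota : P₂[a]? = some (a : Int) := (pvRootAux_root hra).2
  have hrootb : P₂[b]? = some (b : Int) := (pvRootAux_root hrb).2
  have hblen : b < P₂.length := (pvRootAux_root hrb).1
  have hcacb : ca ≠ cb := by
    have h := hRel2 ia ib a b ka kb hia hib hra hrb
    intro e
    exact hab (h.mpr (by rw [hca, hcb, e]))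
  -- merged chase: every cell now ends at (if old root = a then b else old root)
  have hmerge : ∀ i ri ki, pvRootAux ki P₂ i = some ri →
      ∃ k', k' ≤ ki + 1 ∧ pvRootAux k' (P₂.set a (b : Int)) i = some (if ri = a then b else ri) := by
    intro i ri ki h
    by_cases hria : ri = a
    · subst hria
      exact ⟨ki + 1, le_refl _, by rw [if_pos rfl]; exact pvSetRoot_to hroota hrootb hab ki i h⟩
    · exact ⟨ki, by omega, by rw [if_neg hria]; exact pvSetRoot_ne hroota _ ki i ri h hria⟩
  constructor
  · intro c hc
    rw [List.length_set] at hc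
    obtain ⟨rc, kc, hkc, hrc⟩ := hT2 c hc
    obtain ⟨k', hk', h'⟩ := hmerge c rc kc hrc
    exact ⟨_, k', by omega, h'⟩
  · intro i j ri' rj' ki kj hi hj h_i h_j
    rw [List.length_map] at hi hj
    obtain ⟨ri, kri, _, hri⟩ := hT2 i (by omega)
    obtain ⟨rj, krj, _, hrj⟩ := hT2 j (by omega)
    obtain ⟨k1, _, h1⟩ := hmerge i ri kri hri
    obtain ⟨k2, _, h2⟩ := hmerge j rj krj hrj
    have hei : ri' = if ri = a then b else ri := pvRootAux_unique h_i h1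
    have hej : rj' = if rj = a then b else rj := pvRootAux_unique h_j h2
    -- label values
    cases hci : comp[i]? with
    | none => exact absurd (List.getElem?_eq_none_iff.mp hci) (by omega)
    | some ci =>
    cases hcj : comp[j]? with
    | none => exact absurd (List.getElem?_eq_none_iff.mp hcj) (by omega)
    | some cj =>
    have hIJ : ri = rj ↔ ci = cj := by
      have h := hRel2 i j ri rj kri krj hi hj hri hrj
      rw [hci, hcj] at h; simpa using h
    have hIA : ri = a ↔ ci = ca := by
      have h := hRel2 i ia ri a kri ka hi hia hri hra
      rw [hci, hca] at h; simpa using h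
    have hIB : ri = b ↔ ci = cb := by
      have h := hRel2 i ib ri b kri kb hi hib hri hrb
      rw [hci, hcb] at h; simpa using h
    have hJA : rj = a ↔ cj = ca := by
      have h := hRel2 j ia rj a krj ka hj hia hrj hra
      rw [hcj, hca] at h; simpa using h
    have hJB : rj = b ↔ cj = cb := by
      have h := hRel2 j ib rj b krj kb hj hib hrj hrb
      rw [hcj, hcb] at h; simpa using h
    have hmi : (comp.map (fun c => if c = cu then cv else c))[i]? = some (if ci = cu then cv else ci) := by
      rw [List.getElem?_map, hci]; rfl
    have hmj : (comp.map (fun c => if c = cu then cv else c))[j]? = some (if cj = cu then cv else cj) := by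
      rw [List.getElem?_map, hcj]; rfl
    rw [hei, hej, hmi, hmj, Option.some_inj]
    have hcuv : cu ≠ cv := by rcases huv with ⟨rfl, rfl⟩ | ⟨rfl, rfl⟩ <;> simp [hcacb, Ne.symm hcacb]
    rw [pvMerge_eq_iff ri rj a b hab, pvMerge_eq_iff ci cj cu cv hcuv]
    rcases huv with ⟨rfl, rfl⟩ | ⟨rfl, rfl⟩
    · rw [hIJ, hIA, hIB, hJA, hJB]
    · rw [hIJ, hIA, hIB, hJA, hJB]
      exact or_congr Iff.rfl (and_congr or_comm or_comm)

theorem pvUnion_spec {P size comp : List Int} {B fuel : Nat}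
    (hslen : size.length = P.length) (hclen : comp.length = P.length)
    (hR : pvRange P) (hT : pvTerm P B) (hRel : pvRel P comp)
    {x y : Int} (hx1 : -(P.length : Int) ≤ x) (hx2 : x < P.length)
    (hy1 : -(P.length : Int) ≤ y) (hy2 : y < P.length)
    (hfuel : B + 1 ≤ fuel)
    {cxv cyv : Int} (hcx : comp[pvCell P.length x]? = some cxv)
    (hcy : comp[pvCell P.length y]? = some cyv) :
    ∃ P' size' ok, pvUnion fuel P size x y = some (P', size', ok) ∧
      (ok = false → cxv = cyv) ∧
      (ok = true → cxv ≠ cyv ∧ P'.length = P.length ∧ size'.length = P.length ∧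
        pvRange P' ∧ pvTerm P' (B + 1) ∧
        pvRel P' (comp.map (fun c => if c = cxv then cyv else c))) := by
  have hcxlt : pvCell P.length x < P.length := pvCell_lt hx1 hx2
  have hcylt : pvCell P.length y < P.length := pvCell_lt hy1 hy2
  obtain ⟨rx, kx, hkx, hrx⟩ := hT _ hcxlt
  obtain ⟨P₁, hF1, hlen1, hR1, htr1⟩ := pvFind_specI x hR hx1 hx2 hrx (fuel := fuel) (by omega)
  obtain ⟨ry, ky, hky, hry⟩ := hT _ hcylt
  obtain ⟨ky₂, hky₂, hry₁⟩ := htr1 _ ry ky hry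
  have hy1' : -(P₁.length : Int) ≤ y := by rw [hlen1]; exact hy1
  have hy2' : y < P₁.length := by rw [hlen1]; exact hy2
  have hry₁' : pvRootAux ky₂ P₁ (pvCell P₁.length y) = some ry := by rw [hlen1]; exact hry₁
  obtain ⟨P₂, hF2, hlen2, hR2, htr2⟩ := pvFind_specI y hR1 hy1' hy2' hry₁' (fuel := fuel) (by omega)
  have hlen21 : P₂.length = P.length := by rw [hlen2, hlen1]
  have htr12 : ∀ i r' k₁, pvRootAux k₁ P i = some r' → ∃ k₂ ≤ k₁, pvRootAux k₂ P₂ i = some r' := by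
    intro i r' k₁ h
    obtain ⟨ka, hka, ha⟩ := htr1 i r' k₁ h
    obtain ⟨kb, hkb, hb⟩ := htr2 i r' ka ha
    exact ⟨kb, by omega, hb⟩
  have hT2 : pvTerm P₂ B := by
    intro c hc
    rw [hlen21] at hc
    obtain ⟨rc, kc, hkc, hrc⟩ := hT c hc
    obtain ⟨k₂, hk₂, h₂⟩ := htr12 c rc kc hrc
    exact ⟨rc, k₂, by omega, h₂⟩
  have hRel2 : pvRel P₂ comp := by
    intro i j ri' rj' ki kj hi hj h_i h_j
    obtain ⟨ri, kri, _, hri⟩ := hT i (by omega)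
    obtain ⟨rj, krj, _, hrj⟩ := hT j (by omega)
    obtain ⟨k₂, _, h₂⟩ := htr12 i ri kri hri
    obtain ⟨k₃, _, h₃⟩ := htr12 j rj krj hrj
    obtain rfl : ri' = ri := pvRootAux_unique h_i h₂
    obtain rfl : rj' = rj := pvRootAux_unique h_j h₃
    exact hRel i j ri' rj' kri krj hi hj hri hrj
  obtain ⟨kx₂, hkx₂, hrx₂⟩ := htr12 _ rx kx hrx
  obtain ⟨ky₃, hky₃, hry₂⟩ := htr2 _ ry ky₂ hry₁
  have hclen2 : comp.length = P₂.length := by rw [hlen21, hclen]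
  by_cases hxy : rx = ry
  · refine ⟨P₂, size, false, ?_, fun _ => ?_, by simp⟩
    · simp only [pvUnion, hF1, hF2, if_pos (by exact_mod_cast hxy : (rx : Int) = (ry : Int))]
    · have h := (hRel _ _ rx ry kx ky (by omega) (by omega) hrx hry).mp hxy
      rw [hcx, hcy] at h
      exact Option.some_injective _ h
  · have hcxy : cxv ≠ cyv := fun e =>
      hxy ((hRel _ _ rx ry kx ky (by omega) (by omega) hrx hry).mpr (by rw [hcx, hcy, e]))
    have hrxlen : rx < P.length := (pvRootAux_root hrx).1
    have hrylen : ry < P.length := (pvRootAux_root hry).1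
    cases hsx : size[rx]? with
    | none => exact absurd (List.getElem?_eq_none_iff.mp hsx) (by omega)
    | some sx =>
    cases hsy : size[ry]? with
    | none => exact absurd (List.getElem?_eq_none_iff.mp hsy) (by omega)
    | some sy =>
    have hgx : PySem.List.pyGet? size ((rx : Nat) : Int) = some sx := by
      rw [PySem.List.pyGet?_natCast, hsx]
    have hgy : PySem.List.pyGet? size ((ry : Nat) : Int) = some sy := by
      rw [PySem.List.pyGet?_natCast, hsy]
    have hxyI : ((rx : Nat) : Int) ≠ ((ry : Nat) : Int) := by exact_mod_cast hxy
    by_cases hgt : sx > sy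
    · -- parent[y_par] = x_par
      obtain ⟨hT3, hRel3⟩ := pvSetRootPack (a := ry) (b := rx) hT2 hRel2 hclen2
        (by omega) (by omega) hcy hcx hry₂ hrx₂ (Ne.symm hxy) (Or.inr ⟨rfl, rfl⟩)
      refine ⟨P₂.set ry (rx : Int), size.set rx (sx + 1), true, ?_, by simp, fun _ => ?_⟩
      · simp only [pvUnion, hF1, hF2, if_neg hxyI, hgx, hgy, if_pos hgt,
          PySem.List.pySetD_natCast]
      · refine ⟨hcxy, by rw [List.length_set, hlen21], by rw [List.length_set, hslen],
          ?_, hT3, hRel3⟩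
        exact pvRange_set hR2 (by positivity) (by rw [hlen21]; exact_mod_cast hrxlen)
    · -- parent[x_par] = y_par
      obtain ⟨hT3, hRel3⟩ := pvSetRootPack (a := rx) (b := ry) hT2 hRel2 hclen2
        (by omega) (by omega) hcx hcy hrx₂ hry₂ hxy (Or.inl ⟨rfl, rfl⟩)
      refine ⟨P₂.set rx (ry : Int), size.set ry (sy + 1), true, ?_, by simp, fun _ => ?_⟩
      · simp only [pvUnion, hF1, hF2, if_neg hxyI, hgx, hgy, if_neg hgt,
          PySem.List.pySetD_natCast]
      · refine ⟨hcxy, by rw [List.length_set, hlen21], by rw [List.length_set, hslen],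
          ?_, hT3, hRel3⟩
        exact pvRange_set hR2 (by positivity) (by rw [hlen21]; exact_mod_cast hrylen)

theorem pvRun_eq (edges : List (List Int)) :
    ∀ (P size comp : List Int) (B fuel : Nat),
      size.length = P.length → comp.length = P.length →
      pvRange P → pvTerm P B → pvRel P comp →
      (∀ e ∈ edges, e.length = 2 ∧ ∀ v ∈ e, -(P.length : Int) ≤ v ∧ v < (P.length : Int)) →
      B + edges.length + 1 ≤ fuel →
      pvRunA fuel P size edges = pvRunB comp edges := by
  induction edges with
  | nil => intro P size comp B fuel _ _ _ _ _ _ _; rfl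
  | cons e rest ih =>
    intro P size comp B fuel hslen hclen hR hT hRel hvalid hfuel
    obtain ⟨hlen2, hbound⟩ := hvalid e (List.mem_cons_self)
    obtain ⟨x, y, rfl⟩ := List.length_eq_two.mp hlen2
    have hx := hbound x (by simp)
    have hy := hbound y (by simp)
    have hcxlt : pvCell P.length x < comp.length := by
      rw [hclen]; exact pvCell_lt hx.1 hx.2
    have hcylt : pvCell P.length y < comp.length := by
      rw [hclen]; exact pvCell_lt hy.1 hy.2
    cases hcx : comp[pvCell P.length x]? with
    | none => exact absurd (List.getElem?_eq_none_iff.mp hcx) (by omega)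
    | some cxv =>
    cases hcy : comp[pvCell P.length y]? with
    | none => exact absurd (List.getElem?_eq_none_iff.mp hcy) (by omega)
    | some cyv =>
    obtain ⟨P', size', ok, hU, hfalse, htrue⟩ :=
      pvUnion_spec (fuel := fuel) hslen hclen hR hT hRel hx.1 hx.2 hy.1 hy.2 (by simp at hfuel; omega) hcx hcy
    have hgbx : PySem.List.pyGet? comp x = some cxv := by
      rw [pvGet_cell comp x (by rw [hclen]; exact hx.1) (by rw [hclen]; exact hx.2), hclen, hcx]
    have hgby : PySem.List.pyGet? comp y = some cyv := by
      rw [pvGet_cell comp y (by rw [hclen]; exact hy.1) (by rw [hclen]; exact hy.2), hclen, hcy]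
    rw [pvRunA, pvRunB]
    simp only [hU, hgbx, hgby]
    cases ok with
    | false =>
      simp [hfalse rfl]
    | true =>
      obtain ⟨hcxy, hlenP, hlenS, hR', hT', hRel'⟩ := htrue rfl
      rw [if_neg hcxy, if_pos rfl]
      refine ih P' size' _ (B + 1) fuel (by omega) (by rw [List.length_map, hclen, hlenP])
        hR' hT' hRel' ?_ (by simp at hfuel ⊢; omega)
      intro e he
      obtain ⟨h2, hb⟩ := hvalid e (List.mem_cons_of_mem _ he)
      refine ⟨h2, fun v hv => ?_⟩
      rw [hlenP]
      exact hb v hv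

-- ===== VERDICT (by name: the statement is the Claim_ definition above) =====
theorem is_valid_tree_spec : Claim_equal_is_valid_tree := by
  unfold Claim_equal_is_valid_tree
  intro n edges _ hpre
  unfold Spec_is_valid_tree is_valid_tree is_valid_tree_alt
  by_cases hg : (edges.length : Int) ≠ n - 1
  · rw [if_pos hg, if_pos hg]
  · rw [if_neg hg, if_neg hg]
    rw [not_not] at hg
    have hn1 : 1 ≤ n := by omega
    show pvRunA ((PySem.List.pyRange 0 n 1).length + edges.length + 1) (PySem.List.pyRange 0 n 1)
      ((PySem.List.pyRange 0 n 1).map (fun _ => (1 : Int))) edges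
      = pvRunB (PySem.List.pyRange 0 n 1) edges
    set P := PySem.List.pyRange 0 n 1 with hP
    have hPlen : P.length = n.toNat := by
      rw [hP, PySem.List.length_pyRange_one]; omega
    have hPlenI : (P.length : Int) = n := by rw [hPlen]; omega
    have hget : ∀ c : Nat, c < P.length → P[c]? = some (c : Int) := by
      intro c hc
      rw [List.getElem?_eq_getElem hc]
      simp [hP, PySem.List.getElem_pyRange_one]
    have hR : pvRange P := by
      intro v hv
      rw [hPlenI]
      exact PySem.List.mem_pyRange_one.mp (by rwa [hP] at hv)
    have hT : pvTerm P 1 := fun c hc => ⟨c, 1, le_refl _, pvRootAux_one (hget c hc)⟩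
    have hRel : pvRel P P := by
      intro i j ri rj ki kj hi hj h_i h_j
      obtain rfl : i = ri := pvRootAux_unique (pvRootAux_one (hget i hi)) h_i
      obtain rfl : j = rj := pvRootAux_unique (pvRootAux_one (hget j hj)) h_j
      rw [hget i hi, hget j hj]
      constructor
      · rintro rfl; rfl
      · intro h
        have : (i : Int) = (j : Int) := Option.some_injective _ h
        exact_mod_cast this
    have hvalid : ∀ e ∈ edges, e.length = 2 ∧ ∀ v ∈ e, -(P.length : Int) ≤ v ∧ v < (P.length : Int) := by
      intro e he
      obtain ⟨h2, hb⟩ := hpre hg e he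
      refine ⟨h2, fun v hv => ?_⟩
      rw [hPlenI]
      exact hb v hv
    exact pvRun_eq edges P (P.map (fun _ => (1 : Int))) P 1 (P.length + edges.length + 1)
      (by simp) rfl hR hT hRel hvalid (by omega)
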